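-- pv_equiv track=rewrite | github.com/helix4u/hermes-agent | hermes_cli/gateway.py | _summarize_startup_logs
-- ===== SOURCE A (Python) =====
-- def _summarize_startup_logs(log_lines: list[str]) -> list[str]:
--     """Build a compact startup summary from recent log lines."""
--     summary: list[str] = []
--
--     def _last_matching(needle: str) -> str:
--         for line in reversed(log_lines):
--             if needle in line:
--                 return line
--         return ""
--
--     running_line = _last_matching("gateway.run: Gateway running with")
--     if running_line:
--         summary.append(running_line.split("gateway.run: ", 1)[-1])
--
--     for platform in ("discord", "telegram", "slack", "whatsapp", "signal", "email"):
--         if _last_matching(f"gateway.run: {platform} connected"):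
--             summary.append(f"{platform} connected")
--
--     synced_line = _last_matching("slash command(s)")
--     if synced_line and "Synced " in synced_line:
--         summary.append(synced_line.split("gateway.platforms.discord: ", 1)[-1])
--
--     bridge_line = _last_matching("gateway.browser_bridge: Browser bridge listening on")
--     if bridge_line:
--         payload = bridge_line.split("gateway.browser_bridge: ", 1)[-1]
--         endpoint = payload.split(" (token file:", 1)[0]
--         summary.append(endpoint)
--
--     if _last_matching("gateway.run: Cron ticker started"):
--         summary.append("Cron ticker started")
--
--     return summary
-- ===== SOURCE B (Python) =====
-- def _fmt_running(l):
--     return l.split("gateway.run: ", 1)[-1] if l else None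
--
--
-- def _fmt_platform(tag):
--     return lambda l: tag if l else None
--
--
-- def _fmt_synced(l):
--     if l and "Synced " in l:
--         return l.split("gateway.platforms.discord: ", 1)[-1]
--     return None
--
--
-- def _fmt_bridge(l):
--     if l:
--         return l.split("gateway.browser_bridge: ", 1)[-1].split(" (token file:", 1)[0]
--     return None
--
--
-- _SPECS = [
--     ("gateway.run: Gateway running with", _fmt_running),
--     ("gateway.run: discord connected", _fmt_platform("discord connected")),
--     ("gateway.run: telegram connected", _fmt_platform("telegram connected")),
--     ("gateway.run: slack connected", _fmt_platform("slack connected")),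
--     ("gateway.run: whatsapp connected", _fmt_platform("whatsapp connected")),
--     ("gateway.run: signal connected", _fmt_platform("signal connected")),
--     ("gateway.run: email connected", _fmt_platform("email connected")),
--     ("slash command(s)", _fmt_synced),
--     ("gateway.browser_bridge: Browser bridge listening on", _fmt_bridge),
--     ("gateway.run: Cron ticker started", _fmt_platform("Cron ticker started")),
-- ]
--
--
-- def _summarize_startup_logs(log_lines: list[str]) -> list[str]:
--     """Build a compact startup summary: one forward pass recording the last
--     matching line per needle, then a table-driven formatting pass."""
--     last: dict[str, str] = {}
--     for line in log_lines:
--         for needle, _ in _SPECS: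
--             if needle in line:
--                 last[needle] = line
--     summary: list[str] = []
--     for needle, fmt in _SPECS:
--         piece = fmt(last.get(needle, ""))
--         if piece is not None:
--             summary.append(piece)
--     return summary
-- ===== Notes on version B (the rewrite author's own statement) =====
-- stated objective: alternative
-- what changed: A makes nine independent backward scans of log_lines (one per needle) and appends pieces in hand-written sequential branches; B makes a single FORWARD pass that overwrites a dict entry per needle with the latest matching line, then produces the summary by folding over a declarative (needle, formatter) spec table.
import Mathlib
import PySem

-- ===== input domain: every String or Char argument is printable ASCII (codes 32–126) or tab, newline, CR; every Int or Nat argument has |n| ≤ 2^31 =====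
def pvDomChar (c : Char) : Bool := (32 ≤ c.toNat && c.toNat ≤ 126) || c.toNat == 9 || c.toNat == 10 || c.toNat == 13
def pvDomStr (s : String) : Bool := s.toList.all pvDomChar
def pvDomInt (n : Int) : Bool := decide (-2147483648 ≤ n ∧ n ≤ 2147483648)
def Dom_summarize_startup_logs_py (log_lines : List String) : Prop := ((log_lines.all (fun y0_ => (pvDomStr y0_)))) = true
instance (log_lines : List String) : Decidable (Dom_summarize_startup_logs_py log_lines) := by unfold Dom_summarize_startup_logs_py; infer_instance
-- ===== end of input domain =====

-- B replaces A's nine independent backward scans and sequential append branches by one FORWARD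
-- pass recording the last matching line per needle in a dict, plus a table-driven formatting fold;
-- objective: alternative (same asymptotic cost, one traversal of the lines).


-- shared formatting helper: s.split(sep, 1)[-1]; sep is a nonempty literal so splitMax? is some and
-- the split list is nonempty, so the [-1] index always exists (the .getD defaults are unreachable)
def pvTail1 (s sep : String) : String :=
  (PySem.List.pyGet? ((PySem.Str.splitMax? s sep 1).getD []) (-1)).getD ""

-- s.split(sep, 1)[0]; same remarks as pvTail1
def pvHead1 (s sep : String) : String :=
  (PySem.List.pyGet? ((PySem.Str.splitMax? s sep 1).getD []) 0).getD ""

-- ===== PORT A =====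
-- A's helper _last_matching: walk reversed(log_lines), return first line containing the needle, else ""
def pvLastMatch (needle : String) : List String → String
  | [] => ""
  | l :: ls => if PySem.Str.isIn needle l then l else pvLastMatch needle ls

def summarize_startup_logs_py (log_lines : List String) : List String :=
  let lm : String → String := fun needle => pvLastMatch needle log_lines.reverse
  let running_line := lm "gateway.run: Gateway running with"
  let s1 : List String := if running_line ≠ "" then [pvTail1 running_line "gateway.run: "] else []
  let s2 := (["discord", "telegram", "slack", "whatsapp", "signal", "email"]).foldl
      (fun acc p => if lm ("gateway.run: " ++ p ++ " connected") ≠ "" then acc ++ [p ++ " connected"] else acc) s1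
  let synced_line := lm "slash command(s)"
  let s3 := if synced_line ≠ "" ∧ PySem.Str.isIn "Synced " synced_line
            then s2 ++ [pvTail1 synced_line "gateway.platforms.discord: "] else s2
  let bridge_line := lm "gateway.browser_bridge: Browser bridge listening on"
  let s4 := if bridge_line ≠ ""
            then s3 ++ [pvHead1 (pvTail1 bridge_line "gateway.browser_bridge: ") " (token file:"] else s3
  if lm "gateway.run: Cron ticker started" ≠ "" then s4 ++ ["Cron ticker started"] else s4

-- ===== PORT B =====
-- B's formatter helpers (ports of _fmt_running / _fmt_platform / _fmt_synced / _fmt_bridge)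
def pvFmtRunning (l : String) : Option String :=
  if l ≠ "" then some (pvTail1 l "gateway.run: ") else none

def pvFmtPlatform (tag : String) : String → Option String :=
  fun l => if l ≠ "" then some tag else none

def pvFmtSynced (l : String) : Option String :=
  if l ≠ "" ∧ PySem.Str.isIn "Synced " l
  then some (pvTail1 l "gateway.platforms.discord: ") else none

def pvFmtBridge (l : String) : Option String :=
  if l ≠ "" then some (pvHead1 (pvTail1 l "gateway.browser_bridge: ") " (token file:") else none

-- B's declarative spec table _SPECS: (needle, formatter)
def pvSpecs : List (String × (String → Option String)) :=
  [ ("gateway.run: Gateway running with", pvFmtRunning),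
    ("gateway.run: discord connected", pvFmtPlatform "discord connected"),
    ("gateway.run: telegram connected", pvFmtPlatform "telegram connected"),
    ("gateway.run: slack connected", pvFmtPlatform "slack connected"),
    ("gateway.run: whatsapp connected", pvFmtPlatform "whatsapp connected"),
    ("gateway.run: signal connected", pvFmtPlatform "signal connected"),
    ("gateway.run: email connected", pvFmtPlatform "email connected"),
    ("slash command(s)", pvFmtSynced),
    ("gateway.browser_bridge: Browser bridge listening on", pvFmtBridge),
    ("gateway.run: Cron ticker started", pvFmtPlatform "Cron ticker started") ]

-- B's forward recording pass: every match overwrites, so each needle ends at its LAST matching line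
def pvRecord (log_lines : List String) : PySem.Dict String String :=
  log_lines.foldl
    (fun d line => pvSpecs.foldl
      (fun d s => if PySem.Str.isIn s.1 line then d.insert s.1 line else d) d)
    PySem.Dict.empty

-- summary.append(piece) when the formatter returned a piece (not None)
def pvEmit (acc : List String) (o : Option String) : List String :=
  match o with
  | some p => acc ++ [p]
  | none => acc

def summarize_startup_logs_py_alt (log_lines : List String) : List String :=
  let last := pvRecord log_lines
  pvSpecs.foldl (fun acc s => pvEmit acc (s.2 (last.getD s.1 ""))) []

-- ===== PRECONDITION & SPEC =====
def Spec_summarize_startup_logs_py (log_lines : List String) (out : List String) : Prop := out = summarize_startup_logs_py_alt log_lines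
instance (log_lines : List String) (out : List String) : Decidable (Spec_summarize_startup_logs_py log_lines out) := by unfold Spec_summarize_startup_logs_py; infer_instance

-- ===== CLAIM =====
def Claim_equal_summarize_startup_logs_py : Prop := ∀ (log_lines : List String), Dom_summarize_startup_logs_py log_lines → Spec_summarize_startup_logs_py log_lines (summarize_startup_logs_py log_lines)

-- ===== LEMMAS AND PROOFS =====

-- pvEmit applied to an if-option is an if on the list
lemma pvEmit_ite (c : Prop) [Decidable c] (acc : List String) (x : String) :
    pvEmit acc (if c then some x else none) = if c then acc ++ [x] else acc := by
  split <;> rfl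

-- one line of B's recording pass, read at key n
lemma pvRecordStep_get (line : String) (sp : List (String × (String → Option String)))
    (d : PySem.Dict String String) (n : String) :
    (sp.foldl (fun d s => if PySem.Str.isIn s.1 line then d.insert s.1 line else d) d).get? n
      = if n ∈ sp.map Prod.fst ∧ PySem.Str.isIn n line = true then some line else d.get? n := by
  induction sp generalizing d with
  | nil => simp
  | cons k ks ih =>
    rw [List.foldl_cons, ih]
    by_cases hk : PySem.Str.isIn k.1 line = true
    · have hk' : PySem.Chars.isIn k.1.toList line.toList = true := by simpa using hk
      rw [if_pos hk]
      by_cases hnk : n = k.1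
      · subst hnk
        simp [PySem.Dict.get?_insert_self, hk', List.mem_cons]
      · rw [PySem.Dict.get?_insert_of_ne d line hnk]
        by_cases hmem : n ∈ ks.map Prod.fst ∧ PySem.Str.isIn n line = true
        · rw [if_pos hmem, if_pos ⟨by rw [List.map_cons]; exact List.mem_cons_of_mem _ hmem.1, hmem.2⟩]
        · rw [if_neg hmem, if_neg (by
            rintro ⟨h1, h2⟩
            rw [List.map_cons] at h1
            rcases List.mem_cons.mp h1 with h | h
            · exact hnk h
            · exact hmem ⟨h, h2⟩)]
    · have hk' : PySem.Chars.isIn k.1.toList line.toList = false := by simpa using hk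
      rw [if_neg hk]
      by_cases hnk : n = k.1
      · subst hnk
        simp [List.mem_cons, hk']
      · by_cases hmem : n ∈ ks.map Prod.fst ∧ PySem.Str.isIn n line = true
        · rw [if_pos hmem, if_pos ⟨by rw [List.map_cons]; exact List.mem_cons_of_mem _ hmem.1, hmem.2⟩]
        · rw [if_neg hmem, if_neg (by
            rintro ⟨h1, h2⟩
            rw [List.map_cons] at h1
            rcases List.mem_cons.mp h1 with h | h
            · exact hnk h
            · exact hmem ⟨h, h2⟩)]

-- first line of L containing the needle, as an Option (none = no match)
def pvFirstMatch? (needle : String) : List String → Option String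
  | [] => none
  | l :: ls => if PySem.Str.isIn needle l then some l else pvFirstMatch? needle ls

lemma pvFirstMatch?_getD (needle : String) (L : List String) :
    (pvFirstMatch? needle L).getD "" = pvLastMatch needle L := by
  induction L with
  | nil => rfl
  | cons l ls ih =>
    by_cases hm : PySem.Chars.isIn needle.toList l.toList = true
    · simp [pvFirstMatch?, pvLastMatch, hm]
    · simp [pvFirstMatch?, pvLastMatch, hm, ih]

lemma pvFirstMatch?_append (needle : String) (A B : List String) :
    pvFirstMatch? needle (A ++ B) = (pvFirstMatch? needle A).or (pvFirstMatch? needle B) := by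
  induction A with
  | nil => simp [pvFirstMatch?]
  | cons l ls ih =>
    by_cases hm : PySem.Chars.isIn needle.toList l.toList = true
    · simp [pvFirstMatch?, hm]
    · simp [pvFirstMatch?, hm, ih]

-- B's whole forward pass, read at a needle, yields the first match of the REVERSED processed lines
lemma pvRecordFold_get (L : List String) (d : PySem.Dict String String) (n : String)
    (hn : n ∈ pvSpecs.map Prod.fst) :
    (L.foldl (fun d line => pvSpecs.foldl
        (fun d s => if PySem.Str.isIn s.1 line then d.insert s.1 line else d) d) d).get? n
      = (pvFirstMatch? n L.reverse).or (d.get? n) := by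
  induction L generalizing d with
  | nil => simp [pvFirstMatch?]
  | cons l ls ih =>
    rw [List.foldl_cons, ih, pvRecordStep_get l pvSpecs d n, List.reverse_cons,
        pvFirstMatch?_append]
    by_cases hm : PySem.Chars.isIn n.toList l.toList = true
    · simp [pvFirstMatch?, hm, hn]
    · simp [pvFirstMatch?, hm]

lemma pvRecord_lookup (log_lines : List String) (n : String) (hn : n ∈ pvSpecs.map Prod.fst) :
    (pvRecord log_lines).getD n "" = pvLastMatch n log_lines.reverse := by
  unfold pvRecord
  rw [PySem.Dict.getD_eq_get?_getD, pvRecordFold_get _ _ _ hn, PySem.Dict.get?_empty,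
      Option.or_none, pvFirstMatch?_getD]

-- ===== VERDICT =====
theorem summarize_startup_logs_py_spec : Claim_equal_summarize_startup_logs_py := by
  intro log_lines _
  unfold Spec_summarize_startup_logs_py
  have e1 : ("gateway.run: " ++ "discord" ++ " connected" : String) = "gateway.run: discord connected" := rfl
  have e2 : ("gateway.run: " ++ "telegram" ++ " connected" : String) = "gateway.run: telegram connected" := rfl
  have e3 : ("gateway.run: " ++ "slack" ++ " connected" : String) = "gateway.run: slack connected" := rfl
  have e4 : ("gateway.run: " ++ "whatsapp" ++ " connected" : String) = "gateway.run: whatsapp connected" := rfl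
  have e5 : ("gateway.run: " ++ "signal" ++ " connected" : String) = "gateway.run: signal connected" := rfl
  have e6 : ("gateway.run: " ++ "email" ++ " connected" : String) = "gateway.run: email connected" := rfl
  have f1 : ("discord" ++ " connected" : String) = "discord connected" := rfl
  have f2 : ("telegram" ++ " connected" : String) = "telegram connected" := rfl
  have f3 : ("slack" ++ " connected" : String) = "slack connected" := rfl
  have f4 : ("whatsapp" ++ " connected" : String) = "whatsapp connected" := rfl
  have f5 : ("signal" ++ " connected" : String) = "signal connected" := rfl
  have f6 : ("email" ++ " connected" : String) = "email connected" := rfl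
  have h1 := pvRecord_lookup log_lines "gateway.run: Gateway running with" (by decide)
  have h2 := pvRecord_lookup log_lines "gateway.run: discord connected" (by decide)
  have h3 := pvRecord_lookup log_lines "gateway.run: telegram connected" (by decide)
  have h4 := pvRecord_lookup log_lines "gateway.run: slack connected" (by decide)
  have h5 := pvRecord_lookup log_lines "gateway.run: whatsapp connected" (by decide)
  have h6 := pvRecord_lookup log_lines "gateway.run: signal connected" (by decide)
  have h7 := pvRecord_lookup log_lines "slash command(s)" (by decide)
  have h8 := pvRecord_lookup log_lines "gateway.browser_bridge: Browser bridge listening on" (by decide)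
  have h9 := pvRecord_lookup log_lines "gateway.run: Cron ticker started" (by decide)
  have h10 := pvRecord_lookup log_lines "gateway.run: email connected" (by decide)
  simp only [summarize_startup_logs_py, summarize_startup_logs_py_alt, pvSpecs,
    pvFmtRunning, pvFmtPlatform, pvFmtSynced, pvFmtBridge, List.foldl_cons, List.foldl_nil,
    e1, e2, e3, e4, e5, e6, f1, f2, f3, f4, f5, f6,
    h1, h2, h3, h4, h5, h6, h7, h8, h9, h10, pvEmit_ite, List.nil_append]
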